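-- pv_equiv track=rewrite | github.com/KimJiSeong1994/PaperReview | app/DeepAgent/agents/poster_composition_agent.py | _match_figure_to_paper
-- ===== SOURCE A (Python) =====
-- from typing import Any, Dict, List, Optional
--
-- def _match_figure_to_paper(
--
--     paper_title: str,
--     candidate_titles: List[str],
--     already_assigned: set,
-- ) -> Optional[int]:
--     """후보 제목 리스트에서 paper_title에 매칭되는 인덱스를 퍼지 탐색한다.
--
--     매칭 전략 (우선순위 순):
--     1. 정확 일치 (대소문자 무시)
--     2. 후보 제목이 paper_title의 부분 문자열
--     3. paper_title이 후보 제목의 부분 문자열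
--     4. 단어 교집합 ≥ 2개
--
--     Args:
--         paper_title: 매칭 대상 논문 제목.
--         candidate_titles: 후보 제목 리스트 (인덱스 순서 보존).
--         already_assigned: 건너뛸 인덱스 집합.
--
--     Returns:
--         매칭된 인덱스 또는 None.
--     """
--     pt_lower = paper_title.lower().strip()
--     pt_words = set(pt_lower.split())
--
--     best_idx: Optional[int] = None
--     best_score = 0
--
--     for i, candidate in enumerate(candidate_titles):
--         if i in already_assigned:
--             continue
--         ct_lower = (candidate or '').lower().strip()
--         if not ct_lower:
--             continue
--
--         # 전략 1: 정확 일치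
--         if pt_lower == ct_lower:
--             return i
--
--         # 전략 2: 부분 문자열 포함 (양방향)
--         score = 0
--         if ct_lower in pt_lower or pt_lower in ct_lower:
--             score = 3
--
--         # 전략 3: 단어 교집합
--         if score == 0:
--             ct_words = set(ct_lower.split())
--             common = pt_words & ct_words
--             # 불용어 제외 (단어 길이 ≥ 4 기준)
--             meaningful = {w for w in common if len(w) >= 4}
--             score = len(meaningful)
--
--         if score > best_score:
--             best_score = score
--             best_idx = i
--
--     # 단어 교집합 1개 이상일 때만 허용
--     if best_idx is not None and best_score >= 1:
--         return best_idx
--     return None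
-- ===== SOURCE B (Python) =====
-- from typing import List, Optional
--
-- def _match_figure_to_paper(
--     paper_title: str,
--     candidate_titles: List[str],
--     already_assigned: set,
-- ) -> Optional[int]:
--     """Tiered strategy: normalize candidates once; tier 1 returns the first exact
--     match; otherwise word-overlap counts come from an inverted word index, and the
--     answer is the first index of the maximal score (gated at >= 1)."""
--     pt = paper_title.lower().strip()
--     pt_words = set(pt.split())
--
--     # normalization pass: None marks skipped (assigned or empty) candidates
--     norm = []
--     for i, c in enumerate(candidate_titles):
--         ct = (c or '').lower().strip()
--         norm.append(ct if ct and i not in already_assigned else None)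
--
--     # tier 1: first exact match wins outright
--     for i, ct in enumerate(norm):
--         if ct == pt:
--             return i
--
--     # inverted index: word (len >= 4) -> indices of candidates containing it
--     index = {}
--     for i, ct in enumerate(norm):
--         if ct is None:
--             continue
--         for w in set(ct.split()):
--             if len(w) >= 4:
--                 index.setdefault(w, []).append(i)
--
--     # overlap counts accumulated from the index, driven by the title's words
--     counts = {}
--     for w in pt_words:
--         if len(w) >= 4:
--             for i in index.get(w, []):
--                 counts[i] = counts.get(i, 0) + 1
--
--     scores = [0 if ct is None else
--               (3 if (ct in pt or pt in ct) else counts.get(i, 0))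
--               for i, ct in enumerate(norm)]
--
--     m = max(scores, default=0)
--     return scores.index(m) if m >= 1 else None
-- ===== Notes on version B (the rewrite author's own statement) =====
-- stated objective: alternative
-- what changed: Replaces A's single stateful scan (early exact return + running strict-max with a >=1 gate) by tiered passes over a precomputed normalization: an exact-match scan, an inverted word index (word -> candidate indices) from which overlap counts are accumulated Counter-style, and selection by max(scores) followed by scores.index(max).
import Mathlib
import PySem

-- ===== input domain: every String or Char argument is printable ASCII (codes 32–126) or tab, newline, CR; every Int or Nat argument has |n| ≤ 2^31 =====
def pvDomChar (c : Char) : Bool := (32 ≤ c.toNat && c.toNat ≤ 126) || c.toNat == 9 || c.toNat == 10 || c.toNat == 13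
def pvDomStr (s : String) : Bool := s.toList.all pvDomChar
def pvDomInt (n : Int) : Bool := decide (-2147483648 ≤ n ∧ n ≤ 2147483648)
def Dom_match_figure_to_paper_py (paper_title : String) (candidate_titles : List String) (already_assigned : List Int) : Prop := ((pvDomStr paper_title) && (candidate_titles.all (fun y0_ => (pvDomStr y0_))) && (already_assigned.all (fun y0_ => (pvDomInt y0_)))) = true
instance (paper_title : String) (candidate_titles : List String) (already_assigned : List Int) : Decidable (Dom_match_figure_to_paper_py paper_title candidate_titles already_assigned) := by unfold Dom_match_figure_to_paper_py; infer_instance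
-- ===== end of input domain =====

-- B replaces A's single stateful scan by tiered passes: normalize once, scan for an
-- exact match, build an inverted word index feeding Counter-style overlap counts,
-- then select with max(scores) followed by scores.index(max); objective: alternative.

-- ===== PORT A =====
-- A's for-loop with early return on exact match, carrying (best_idx, best_score).
def pvLoopA (ptLower : String) (ptWords : PySem.Set String) (assigned : List Int) :
    List (Int × String) → Option Int → Int → Option Int
  | [], bestIdx, bestScore =>
      if bestIdx.isSome ∧ 1 ≤ bestScore then bestIdx else none
  | (i, candidate) :: rest, bestIdx, bestScore =>
      if PySem.Set.contains assigned i then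
        pvLoopA ptLower ptWords assigned rest bestIdx bestScore
      else
        let ctLower := PySem.Str.strip (PySem.Str.lower candidate)  -- (candidate or '') is candidate for str
        if ctLower = "" then pvLoopA ptLower ptWords assigned rest bestIdx bestScore
        else if ptLower = ctLower then some i
        else
          -- score = 3 on substring containment, else the meaningful word-overlap count
          let score : Int :=
            if PySem.Str.isIn ctLower ptLower || PySem.Str.isIn ptLower ctLower then 3
            else
              let ctWords := PySem.Set.ofList (PySem.Str.split₀ ctLower)
              (((PySem.Set.inter ptWords ctWords).filter
                  (fun w => decide (4 ≤ PySem.Str.len w))).length : Int)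
          if bestScore < score then pvLoopA ptLower ptWords assigned rest (some i) score
          else pvLoopA ptLower ptWords assigned rest bestIdx bestScore

def match_figure_to_paper_py (paper_title : String) (candidate_titles : List String) (already_assigned : List Int) : Option Int :=
  let ptLower := PySem.Str.strip (PySem.Str.lower paper_title)
  let ptWords := PySem.Set.ofList (PySem.Str.split₀ ptLower)
  pvLoopA ptLower ptWords already_assigned (PySem.List.enumerate candidate_titles 0) none 0

-- ===== PORT B =====
-- normalization of one enumerated candidate: none marks skipped (assigned or empty) ones
def pvNorm1 (assigned : List Int) (ic : Int × String) : Option String :=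
  let ct := PySem.Str.strip (PySem.Str.lower ic.2)
  if ct ≠ "" ∧ ¬ PySem.Set.contains assigned ic.1 then some ct else none

-- tier-1 scan: first index whose normalized candidate equals the normalized title
def pvExactScan (pt : String) : List (Int × Option String) → Option Int
  | [] => none
  | (i, o) :: rest => if o = some pt then some i else pvExactScan pt rest

-- one step of the inverted-index build: index.setdefault(w, []).append(i)
def pvIndexStep (d : PySem.Dict String (List Int)) (io : Int × Option String) :
    PySem.Dict String (List Int) :=
  match io.2 with
  | none => d
  | some ct =>
      (PySem.Set.ofList (PySem.Str.split₀ ct)).foldl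
        (fun d w => if 4 ≤ PySem.Str.len w then d.modify w [] (· ++ [io.1]) else d) d

-- inverted index: word (len >= 4) -> indices of candidates containing it
def pvBuildIndex (l : List (Int × Option String)) : PySem.Dict String (List Int) :=
  l.foldl pvIndexStep PySem.Dict.empty

-- overlap counts accumulated from the index, driven by the title's words
def pvBuildCounts (ptWords : PySem.Set String) (index : PySem.Dict String (List Int)) :
    PySem.Dict Int Int :=
  ptWords.foldl (fun d w =>
      if 4 ≤ PySem.Str.len w then
        (index.getD w []).foldl (fun d i => d.modify i (0 : Int) (· + 1)) d
      else d) PySem.Dict.empty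

-- score of one normalized candidate
def pvScore1 (pt : String) (counts : PySem.Dict Int Int) (io : Int × Option String) : Int :=
  match io.2 with
  | none => 0
  | some ct =>
      if PySem.Str.isIn ct pt || PySem.Str.isIn pt ct then 3
      else counts.getD io.1 0

def match_figure_to_paper_py_alt (paper_title : String) (candidate_titles : List String) (already_assigned : List Int) : Option Int :=
  let pt := PySem.Str.strip (PySem.Str.lower paper_title)
  let ptWords := PySem.Set.ofList (PySem.Str.split₀ pt)
  let norm := (PySem.List.enumerate candidate_titles 0).map (pvNorm1 already_assigned)
  match pvExactScan pt (PySem.List.enumerate norm 0) with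
  | some i => some i
  | none =>
      let index := pvBuildIndex (PySem.List.enumerate norm 0)
      let counts := pvBuildCounts ptWords index
      let scores := (PySem.List.enumerate norm 0).map (pvScore1 pt counts)
      let m := PySem.List.maxD scores (fun s => s) 0
      if 1 ≤ m then (PySem.List.index? scores m).map (fun (k : Nat) => (k : Int)) else none

-- ===== PRECONDITION & SPEC =====
def Spec_match_figure_to_paper_py (paper_title : String) (candidate_titles : List String) (already_assigned : List Int) (out : Option Int) : Prop := out = match_figure_to_paper_py_alt paper_title candidate_titles already_assigned
instance (paper_title : String) (candidate_titles : List String) (already_assigned : List Int) (out : Option Int) : Decidable (Spec_match_figure_to_paper_py paper_title candidate_titles already_assigned out) := by unfold Spec_match_figure_to_paper_py; infer_instance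

-- ===== CLAIM (what is proved, stated in full; the proofs are below) =====
def Claim_equal_match_figure_to_paper_py : Prop := ∀ (paper_title : String) (candidate_titles : List String) (already_assigned : List Int), Dom_match_figure_to_paper_py paper_title candidate_titles already_assigned → Spec_match_figure_to_paper_py paper_title candidate_titles already_assigned (match_figure_to_paper_py paper_title candidate_titles already_assigned)

-- ===== LEMMAS AND PROOFS =====

-- proof-side abbreviations
def pvCt (c : String) : String := PySem.Str.strip (PySem.Str.lower c)

-- A's effective score of one enumerated candidate (0 for skipped/empty ones)
def pvScA (pt : String) (aa : List Int) (q : Int × String) : Int :=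
  if PySem.Set.contains aa q.1 then 0
  else if pvCt q.2 = "" then 0
  else if PySem.Str.isIn (pvCt q.2) pt || PySem.Str.isIn pt (pvCt q.2) then 3
  else (((PySem.Set.inter (PySem.Set.ofList (PySem.Str.split₀ pt))
        (PySem.Set.ofList (PySem.Str.split₀ (pvCt q.2)))).filter
        (fun w => decide (4 ≤ PySem.Str.len w))).length : Int)

-- first exact match in A's sense
def pvFirstExact (pt : String) (aa : List Int) : List (Int × String) → Option Int
  | [] => none
  | q :: rest =>
      if ¬ PySem.Set.contains aa q.1 ∧ pvCt q.2 ≠ "" ∧ pt = pvCt q.2 then some q.1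
      else pvFirstExact pt aa rest

-- pure best-tracking loop (A's state machine over precomputed scores)
def pvPick : List (Int × Int) → Option Int → Int → Option Int
  | [], best, bS => if best.isSome ∧ 1 ≤ bS then best else none
  | (i, s) :: rest, best, bS =>
      if bS < s then pvPick rest (some i) s else pvPick rest best bS

-- words of a normalized candidate that the inverted index records
def pvWordsOf (o : Option String) : List String :=
  match o with
  | none => []
  | some ct => (PySem.Set.ofList (PySem.Str.split₀ ct)).filter (fun w => decide (4 ≤ PySem.Str.len w))

theorem pvEnumerate_map {α β : Type} (f : α → β) (xs : List α) (k : Int) :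
    PySem.List.enumerate (xs.map f) k
      = (PySem.List.enumerate xs k).map (fun q => (q.1, f q.2)) := by
  induction xs generalizing k with
  | nil => rfl
  | cons x xs ih => simp [PySem.List.enumerate_cons, ih]

theorem pvEnumerate_enumerate {α : Type} (xs : List α) (k : Int) :
    PySem.List.enumerate (PySem.List.enumerate xs k) k
      = (PySem.List.enumerate xs k).map (fun q => (q.1, q)) := by
  induction xs generalizing k with
  | nil => rfl
  | cons x xs ih => simp [PySem.List.enumerate_cons, ih]

theorem pvEnumerate_map_enum {α β : Type} (f : Int × α → β) (xs : List α) :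
    PySem.List.enumerate ((PySem.List.enumerate xs 0).map f) 0
      = (PySem.List.enumerate xs 0).map (fun q => (q.1, f q)) := by
  rw [pvEnumerate_map, pvEnumerate_enumerate, List.map_map]
  simp [Function.comp_def]

-- ===== A-side characterization =====
theorem pvLoopA_exact (pt : String) (aa : List Int) :
    ∀ (l : List (Int × String)) (best : Option Int) (bS : Int) (i : Int),
    pvFirstExact pt aa l = some i →
    pvLoopA pt (PySem.Set.ofList (PySem.Str.split₀ pt)) aa l best bS = some i := by
  intro l
  induction l with
  | nil => intro best bS i h; simp [pvFirstExact] at h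
  | cons q rest ih =>
      intro best bS i h
      obtain ⟨j, c⟩ := q
      simp only [pvFirstExact] at h
      simp only [pvLoopA]
      rw [show PySem.Str.strip (PySem.Str.lower c) = pvCt c from rfl]
      by_cases hc : ¬ PySem.Set.contains aa j ∧ pvCt c ≠ "" ∧ pt = pvCt c
      · rw [if_pos hc] at h
        rw [if_neg hc.1, if_neg hc.2.1, if_pos hc.2.2]
        exact h
      · rw [if_neg hc] at h
        by_cases ha : PySem.Set.contains aa j
        · rw [if_pos ha]; exact ih best bS i h
        · rw [if_neg ha]
          by_cases hempty : pvCt c = ""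
          · rw [if_pos hempty]; exact ih best bS i h
          · rw [if_neg hempty]
            have hex : ¬ pt = pvCt c := fun hx => hc ⟨ha, hempty, hx⟩
            rw [if_neg hex]
            split_ifs <;> exact ih _ _ i h

theorem pvLoopA_noexact (pt : String) (aa : List Int) :
    ∀ (l : List (Int × String)) (best : Option Int) (bS : Int),
    pvFirstExact pt aa l = none → 0 ≤ bS →
    pvLoopA pt (PySem.Set.ofList (PySem.Str.split₀ pt)) aa l best bS =
      pvPick (l.map (fun q => (q.1, pvScA pt aa q))) best bS := by
  intro l
  induction l with
  | nil => intro best bS _ _; rfl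
  | cons q rest ih =>
      intro best bS h hbS
      obtain ⟨j, c⟩ := q
      simp only [pvFirstExact] at h
      simp only [pvLoopA, List.map_cons, pvPick]
      rw [show PySem.Str.strip (PySem.Str.lower c) = pvCt c from rfl]
      by_cases hc : ¬ PySem.Set.contains aa j ∧ pvCt c ≠ "" ∧ pt = pvCt c
      · rw [if_pos hc] at h; exact absurd h (by simp)
      · rw [if_neg hc] at h
        by_cases ha : PySem.Set.contains aa j
        · have hs : pvScA pt aa (j, c) = 0 := by
            simp only [pvScA]; rw [if_pos ha]
          rw [if_pos ha, hs, if_neg (by omega : ¬ bS < (0:Int))]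
          exact ih best bS h hbS
        · rw [if_neg ha]
          by_cases hempty : pvCt c = ""
          · have hs : pvScA pt aa (j, c) = 0 := by
              simp only [pvScA]; rw [if_neg ha, if_pos hempty]
            rw [if_pos hempty, hs, if_neg (by omega : ¬ bS < (0:Int))]
            exact ih best bS h hbS
          · have hex : ¬ pt = pvCt c := fun hx => hc ⟨ha, hempty, hx⟩
            rw [if_neg hempty, if_neg hex]
            have hsc : pvScA pt aa (j, c) =
                (if PySem.Str.isIn (pvCt c) pt || PySem.Str.isIn pt (pvCt c) then (3:Int)
                 else (((PySem.Set.inter (PySem.Set.ofList (PySem.Str.split₀ pt))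
                      (PySem.Set.ofList (PySem.Str.split₀ (pvCt c)))).filter
                      (fun w => decide (4 ≤ PySem.Str.len w))).length : Int)) := by
              simp only [pvScA]; rw [if_neg ha, if_neg hempty]
            have hs0 : 0 ≤ pvScA pt aa (j, c) := by
              rw [hsc]; split_ifs
              · omega
              · exact Int.natCast_nonneg _
            rw [← hsc]
            by_cases hup : bS < pvScA pt aa (j, c)
            · rw [if_pos hup, if_pos hup]
              exact ih (some j) _ h hs0
            · rw [if_neg hup, if_neg hup]
              exact ih best bS h hbS

-- ===== selection: running strict max = max(scores) then scores.index(max) =====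
theorem pvPick_eq (scores : List Int) :
    ∀ (k : Int) (best : Option Int) (bS : Int),
    ((best = none ∧ bS = 0) ∨ (best.isSome ∧ 1 ≤ bS)) →
    pvPick (PySem.List.enumerate scores k) best bS =
      if bS < scores.foldl max bS
      then (PySem.List.index? scores (scores.foldl max bS)).map (fun (j : Nat) => k + (j : Int))
      else if best.isSome ∧ 1 ≤ bS then best else none := by
  induction scores with
  | nil =>
      intro k best bS _
      simp only [PySem.List.enumerate, List.foldl, pvPick]
      rw [if_neg (lt_irrefl bS)]
  | cons s rest ih =>
      intro k best bS hinv
      have hbS0 : 0 ≤ bS := by rcases hinv with ⟨_, h⟩ | ⟨_, h⟩ <;> omega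
      rw [PySem.List.enumerate_cons]
      simp only [pvPick, List.foldl]
      by_cases hup : bS < s
      · rw [if_pos hup]
        have hmax : max bS s = s := by omega
        rw [hmax]
        have hM := (PySem.List.le_foldl_max rest s).1
        rw [ih (k+1) (some k) s (Or.inr ⟨rfl, by omega⟩)]
        by_cases hlt : s < rest.foldl max s
        · rw [if_pos hlt, if_pos (show bS < rest.foldl max s by omega)]
          have hne : s ≠ rest.foldl max s := by omega
          rw [PySem.List.index?_cons_of_ne rest hne]
          cases PySem.List.index? rest (rest.foldl max s) with
          | none => rfl
          | some j => simp only [Option.map_some, Option.some.injEq]; omega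
        · have heq : rest.foldl max s = s := by omega
          rw [if_neg hlt, if_pos (show (some k).isSome = true ∧ 1 ≤ s from ⟨rfl, by omega⟩),
              if_pos (show bS < rest.foldl max s by omega), heq, PySem.List.index?_cons_self]
          simp
      · rw [if_neg hup]
        have hmax : max bS s = bS := by omega
        rw [hmax]
        have hM := (PySem.List.le_foldl_max rest bS).1
        rw [ih (k+1) best bS hinv]
        by_cases hlt : bS < rest.foldl max bS
        · rw [if_pos hlt, if_pos hlt]
          have hne : s ≠ rest.foldl max bS := by omega
          rw [PySem.List.index?_cons_of_ne rest hne]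
          cases PySem.List.index? rest (rest.foldl max bS) with
          | none => rfl
          | some j => simp only [Option.map_some, Option.some.injEq]; omega
        · rw [if_neg hlt, if_neg hlt]

-- max(scores, default=0) is the running max over nonnegative scores
theorem pvMaxD_eq (xs : List Int) (h : ∀ s ∈ xs, 0 ≤ s) :
    PySem.List.maxD xs (fun s => s) 0 = xs.foldl max 0 := by
  cases hm : PySem.List.max? xs (fun s => s) with
  | none =>
      have hnil : xs = [] := (PySem.List.max?_eq_none_iff xs _).1 hm
      subst hnil
      rfl
  | some m =>
      have hmem : m ∈ xs := PySem.List.max?_mem hm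
      have hmax : ∀ y ∈ xs, y ≤ m := by
        have := PySem.List.max?_isMax (κ := Int) (key := fun s => s) hm
        simpa using this
      have h1 : m ≤ xs.foldl max 0 := (PySem.List.le_foldl_max xs 0).2 m hmem
      have h2 : xs.foldl max 0 ≤ m := by
        rcases PySem.List.foldl_max_mem xs 0 with heq | hmem'
        · rw [heq]; exact h m hmem
        · exact hmax _ hmem'
      simp only [PySem.List.maxD, hm, Option.getD_some]
      omega

-- ===== B-side: the inverted index and the counts =====

-- the (word, index) pairs the inverted-index build inserts, flattened
def pvPairs (l : List (Int × Option String)) : List (String × Int) :=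
  l.flatMap (fun io => (pvWordsOf io.2).map (fun w => (w, io.1)))

theorem pvPairs_cons (io : Int × Option String) (rest : List (Int × Option String)) :
    pvPairs (io :: rest) = (pvWordsOf io.2).map (fun w => (w, io.1)) ++ pvPairs rest := by
  simp [pvPairs]

theorem pvIndexStep_eq (d : PySem.Dict String (List Int)) (io : Int × Option String) :
    pvIndexStep d io
      = ((pvWordsOf io.2).map (fun w => (w, io.1))).foldl
          (fun d p => d.modify p.1 [] (· ++ [p.2])) d := by
  obtain ⟨i, o⟩ := io
  cases o with
  | none => rfl
  | some ct =>
      simp only [pvIndexStep, pvWordsOf, List.foldl_map, List.foldl_filter]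
      congr 1
      funext d' w
      split_ifs <;> first | rfl | (simp_all; try omega)

theorem pvIndex_eq (l : List (Int × Option String)) :
    ∀ (d : PySem.Dict String (List Int)),
    l.foldl pvIndexStep d
      = (pvPairs l).foldl (fun d p => d.modify p.1 [] (· ++ [p.2])) d := by
  induction l with
  | nil => intro d; rfl
  | cons io rest ih =>
      intro d
      rw [pvPairs_cons, List.foldl_append, List.foldl_cons, pvIndexStep_eq]
      exact ih _

-- countP of the flattened pairs at an index absent from the list is zero
theorem pvPairs_zero (w : String) (i : Int) :
    ∀ (l : List (Int × Option String)), i ∉ l.map Prod.fst →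
    (pvPairs l).countP (fun p => p.2 == i && p.1 == w) = 0 := by
  intro l
  induction l with
  | nil => intro _; rfl
  | cons io rest ih =>
      intro hni
      simp only [List.map_cons, List.mem_cons, not_or] at hni
      rw [pvPairs_cons, List.countP_append, ih hni.2]
      have hhead : ((pvWordsOf io.2).map (fun w => (w, io.1))).countP
          (fun p => p.2 == i && p.1 == w) = 0 := by
        rw [List.countP_map]
        apply List.countP_eq_zero.2
        intro x _
        simp [Ne.symm hni.1]
      omega

-- countP of the flattened pairs at a present index is that candidate's word count
theorem pvPairs_count (w : String) (i : Int) (o : Option String) :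
    ∀ (l : List (Int × Option String)), (l.map Prod.fst).Nodup → (i, o) ∈ l →
    (pvPairs l).countP (fun p => p.2 == i && p.1 == w) = (pvWordsOf o).count w := by
  intro l
  induction l with
  | nil => intro _ h; simp at h
  | cons io rest ih =>
      intro hnd hmem
      obtain ⟨j, o'⟩ := io
      simp only [List.map_cons, List.nodup_cons] at hnd
      rw [pvPairs_cons, List.countP_append]
      by_cases hj : j = i
      · subst hj
        have ho : o' = o := by
          rcases List.mem_cons.1 hmem with h | h
          · exact (congrArg Prod.snd h).symm
          · exact absurd (List.mem_map.2 ⟨(j, o), h, rfl⟩) hnd.1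
        subst ho
        rw [pvPairs_zero w j rest hnd.1]
        rw [List.countP_map, List.count_eq_countP]
        have hc : List.countP ((fun p => p.2 == j && p.1 == w) ∘ (fun w => (w, j))) (pvWordsOf o')
            = List.countP (fun x => x == w) (pvWordsOf o') :=
          List.countP_congr (fun x _ => by simp)
        omega
      · have hmem' : (i, o) ∈ rest := by
          rcases List.mem_cons.1 hmem with h | h
          · exact absurd (congrArg Prod.fst h).symm hj
          · exact h
        have hhead : ((pvWordsOf o').map (fun w => (w, j))).countP
            (fun p => p.2 == i && p.1 == w) = 0 := by
          rw [List.countP_map]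
          apply List.countP_eq_zero.2
          intro x _
          simp [hj]
        rw [hhead, ih hnd.2 hmem']
        omega

-- count over the flattened per-word buckets
theorem pvCount_flatMap (i : Int) (f : String → List Int) :
    ∀ (ws : List String), (ws.flatMap f).count i = (ws.map (fun w => (f w).count i)).sum := by
  intro ws
  induction ws with
  | nil => rfl
  | cons w rest ih =>
      simp only [List.flatMap_cons, List.map_cons, List.sum_cons, List.count_append, ih]

-- 0/1 sum over filtered title words = A's filtered-intersection length
theorem pvSumCount (ws ctW : List String)
    (hws : ∀ w, w ∈ ws ↔ (w ∈ ctW ∧ 4 ≤ PySem.Str.len w)) :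
    ∀ (ptW : List String),
    ((ptW.filter (fun w => decide (4 ≤ PySem.Str.len w))).map
        (fun w => if w ∈ ws then 1 else 0)).sum
      = ((ptW.filter (fun x => ctW.contains x)).filter
          (fun w => decide (4 ≤ PySem.Str.len w))).length := by
  intro ptW
  induction ptW with
  | nil => rfl
  | cons x rest ih =>
      by_cases hlen : 4 ≤ PySem.Str.len x
      · have hd : decide (4 ≤ PySem.Str.len x) = true := by simpa using hlen
        by_cases hct : x ∈ ctW
        · have hcb : ctW.contains x = true := by simpa using hct
          have hmemws : x ∈ ws := (hws x).2 ⟨hct, hlen⟩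
          simp only [List.filter_cons, hd, hcb, if_true, List.map_cons, List.sum_cons,
            List.length_cons, if_pos hmemws, ih]
          omega
        · have hcb : ctW.contains x = false := by simpa using hct
          have hnm : x ∉ ws := fun hx => hct ((hws x).1 hx).1
          simp only [List.filter_cons, hd, hcb, if_true, Bool.false_eq_true, if_false,
            List.map_cons, List.sum_cons, if_neg hnm, ih]
          omega
      · have hd : decide (4 ≤ PySem.Str.len x) = false := by simpa using hlen
        simp only [List.filter_cons, hd, Bool.false_eq_true, if_false]
        split_ifs with hcb
        · simp only [List.filter_cons, hd, Bool.false_eq_true, if_false]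
          exact ih
        · exact ih

-- ===== assembled counts correctness =====
theorem pvCounts_getD (pt : String) (norm : List (Int × Option String))
    (hnd : (norm.map Prod.fst).Nodup) (i : Int) (ct : String)
    (hmem : (i, some ct) ∈ norm) :
    (pvBuildCounts (PySem.Set.ofList (PySem.Str.split₀ pt)) (pvBuildIndex norm)).getD i 0
      = (((PySem.Set.inter (PySem.Set.ofList (PySem.Str.split₀ pt))
          (PySem.Set.ofList (PySem.Str.split₀ ct))).filter
          (fun w => decide (4 ≤ PySem.Str.len w))).length : Int) := by
  unfold pvBuildCounts
  have hstep : (fun (d : PySem.Dict Int Int) (w : String) =>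
      if 4 ≤ PySem.Str.len w then
        ((pvBuildIndex norm).getD w []).foldl (fun d i => d.modify i (0 : Int) (· + 1)) d
      else d)
      = (fun d w => if (fun w => decide (4 ≤ PySem.Str.len w)) w = true then
          ((pvBuildIndex norm).getD w []).foldl (fun d i => d.modify i (0 : Int) (· + 1)) d
        else d) := by
    funext d w
    split_ifs <;> first | rfl | (simp_all; try omega)
  rw [hstep, ← List.foldl_filter, ← List.foldl_flatMap,
      PySem.Dict.getD_foldl_modify_add_one, PySem.Dict.getD_empty, pvCount_flatMap]
  have hbucket : (fun w => (((pvBuildIndex norm).getD w []).count i))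
      = (fun w => if w ∈ pvWordsOf (some ct) then 1 else 0) := by
    funext w
    unfold pvBuildIndex
    rw [pvIndex_eq, PySem.Dict.getD_foldl_modify_append, PySem.Dict.getD_empty,
        List.nil_append, List.count_eq_countP, List.countP_map, List.countP_filter]
    have hpred : List.countP (fun a => ((fun x => x == i) ∘ fun p => p.2) a && (a.1 == w)) (pvPairs norm)
        = List.countP (fun p => p.2 == i && p.1 == w) (pvPairs norm) :=
      List.countP_congr (fun p _ => by simp)
    rw [hpred, pvPairs_count w i (some ct) norm hnd hmem]
    exact List.Nodup.count ((PySem.Set.nodup_ofList _).filter _)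
  rw [hbucket, pvSumCount (pvWordsOf (some ct)) (PySem.Set.ofList (PySem.Str.split₀ ct))
      (fun w => by simp [pvWordsOf, List.mem_filter])]
  rw [show PySem.Set.inter (PySem.Set.ofList (PySem.Str.split₀ pt))
      (PySem.Set.ofList (PySem.Str.split₀ ct))
      = (PySem.Set.ofList (PySem.Str.split₀ pt)).filter
          (fun x => (PySem.Set.ofList (PySem.Str.split₀ ct)).contains x) from rfl]
  simp only [PySem.Set.contains_eq_listContains]
  omega

-- ===== B's exact scan = A's first exact match =====
theorem pvExactScan_eq (pt : String) (aa : List Int) :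
    ∀ (l : List (Int × String)),
    pvExactScan pt (l.map (fun q => (q.1, pvNorm1 aa q))) = pvFirstExact pt aa l := by
  intro l
  induction l with
  | nil => rfl
  | cons q rest ih =>
      simp only [List.map_cons, pvExactScan, pvFirstExact]
      by_cases h : ¬ PySem.Set.contains aa q.1 ∧ pvCt q.2 ≠ "" ∧ pt = pvCt q.2
      · rw [if_pos h, if_pos]
        simp only [pvNorm1]
        rw [show PySem.Str.strip (PySem.Str.lower q.2) = pvCt q.2 from rfl]
        rw [if_pos ⟨h.2.1, h.1⟩]
        exact congrArg some h.2.2.symm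
      · rw [if_neg h, if_neg, ih]
        intro hc
        apply h
        simp only [pvNorm1] at hc
        rw [show PySem.Str.strip (PySem.Str.lower q.2) = pvCt q.2 from rfl] at hc
        by_cases hv : pvCt q.2 ≠ "" ∧ ¬ PySem.Set.contains aa q.1
        · rw [if_pos hv] at hc
          exact ⟨hv.2, hv.1, (Option.some.inj hc).symm⟩
        · rw [if_neg hv] at hc
          exact absurd hc (by simp)

-- ===== B's per-candidate score = A's effective score =====
theorem pvScore1_eq (pt : String) (aa : List Int) (cs : List String) (q : Int × String)
    (hq : q ∈ PySem.List.enumerate cs 0) :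
    pvScore1 pt (pvBuildCounts (PySem.Set.ofList (PySem.Str.split₀ pt))
        (pvBuildIndex ((PySem.List.enumerate cs 0).map (fun q => (q.1, pvNorm1 aa q)))))
      (q.1, pvNorm1 aa q)
      = pvScA pt aa q := by
  have hnorm : pvNorm1 aa q =
      (if pvCt q.2 ≠ "" ∧ ¬ PySem.Set.contains aa q.1 then some (pvCt q.2) else none) := rfl
  by_cases ha : PySem.Set.contains aa q.1
  · have h0 : pvNorm1 aa q = none := by rw [hnorm, if_neg (fun hcond => hcond.2 ha)]
    rw [show pvScA pt aa q = 0 from by simp only [pvScA]; rw [if_pos ha]]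
    simp [pvScore1, h0]
  · by_cases hempty : pvCt q.2 = ""
    · have h0 : pvNorm1 aa q = none := by
        rw [hnorm, if_neg (fun hcond => hcond.1 hempty)]
      rw [show pvScA pt aa q = 0 from by simp only [pvScA]; rw [if_neg ha, if_pos hempty]]
      simp [pvScore1, h0]
    · have h1 : pvNorm1 aa q = some (pvCt q.2) := by rw [hnorm, if_pos ⟨hempty, ha⟩]
      simp only [pvScore1, h1]
      simp only [pvScA]
      rw [if_neg ha, if_neg hempty]
      by_cases hsub : PySem.Str.isIn (pvCt q.2) pt || PySem.Str.isIn pt (pvCt q.2)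
      · rw [if_pos hsub, if_pos hsub]
      · rw [if_neg hsub, if_neg hsub]
        apply pvCounts_getD
        · rw [List.map_map]
          rw [show (Prod.fst ∘ fun q : Int × String => (q.1, pvNorm1 aa q)) = (Prod.fst : Int × String → Int) from rfl]
          rw [show ((PySem.List.enumerate cs 0).map (Prod.fst : Int × String → Int)) = (PySem.List.enumerate cs 0).map (·.1) from rfl]
          rw [show ((PySem.List.enumerate cs 0).map (·.1)) = PySem.List.pyRange 0 (0 + cs.length) 1 from PySem.List.map_fst_enumerate cs 0]
          exact PySem.List.nodup_pyRange_one 0 (0 + cs.length)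
        · rw [← h1]
          exact List.mem_map.2 ⟨q, hq, rfl⟩

-- scores are nonnegative
theorem pvScA_nonneg (pt : String) (aa : List Int) (q : Int × String) : 0 ≤ pvScA pt aa q := by
  simp only [pvScA]
  split_ifs
  · omega
  · omega
  · omega
  · exact Int.natCast_nonneg _

-- ===== VERDICT (by name: the statement is the Claim_ definition above) =====
set_option maxHeartbeats 1000000 in
theorem match_figure_to_paper_py_spec : Claim_equal_match_figure_to_paper_py := by
  intro p cs aa _
  unfold Spec_match_figure_to_paper_py
  simp only [match_figure_to_paper_py, match_figure_to_paper_py_alt]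
  rw [show PySem.Str.strip (PySem.Str.lower p) = pvCt p from rfl]
  rw [pvEnumerate_map_enum (pvNorm1 aa) cs]
  rw [pvExactScan_eq (pvCt p) aa (PySem.List.enumerate cs 0)]
  cases hfe : pvFirstExact (pvCt p) aa (PySem.List.enumerate cs 0) with
  | some i => exact pvLoopA_exact (pvCt p) aa _ none 0 i hfe
  | none =>
      rw [pvLoopA_noexact (pvCt p) aa _ none 0 hfe le_rfl]
      have hmapeq : ((PySem.List.enumerate cs 0).map (fun q => (q.1, pvNorm1 aa q))).map
          (pvScore1 (pvCt p) (pvBuildCounts (PySem.Set.ofList (PySem.Str.split₀ (pvCt p)))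
            (pvBuildIndex ((PySem.List.enumerate cs 0).map (fun q => (q.1, pvNorm1 aa q))))))
          = (PySem.List.enumerate cs 0).map (fun q => pvScA (pvCt p) aa q) := by
        rw [List.map_map]
        apply List.map_congr_left
        intro q hq
        rw [Function.comp_apply]
        exact pvScore1_eq (pvCt p) aa cs q hq
      rw [hmapeq]
      rw [show ((PySem.List.enumerate cs 0).map (fun q => (q.1, pvScA (pvCt p) aa q)))
          = PySem.List.enumerate ((PySem.List.enumerate cs 0).map (fun q => pvScA (pvCt p) aa q)) 0
          from (pvEnumerate_map_enum _ cs).symm]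
      set scoresA := (PySem.List.enumerate cs 0).map (fun q => pvScA (pvCt p) aa q) with hscoresA
      have hnn : ∀ s ∈ scoresA, 0 ≤ s := by
        intro s hs
        rw [hscoresA] at hs
        obtain ⟨q, _, rfl⟩ := List.mem_map.1 hs
        exact pvScA_nonneg _ _ _
      rw [pvPick_eq scoresA 0 none 0 (Or.inl ⟨rfl, rfl⟩), pvMaxD_eq scoresA hnn]
      by_cases hM : 1 ≤ scoresA.foldl max 0
      · rw [if_pos (show (0:Int) < scoresA.foldl max 0 by omega), if_pos hM]
        cases PySem.List.index? scoresA (scoresA.foldl max 0) with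
        | none => rfl
        | some j => simp
      · rw [if_neg (show ¬ (0:Int) < scoresA.foldl max 0 by omega), if_neg hM]
        simp
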